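-- pv_equiv track=rewrite | github.com/andreasbueckle/ccf-queries | cell_annotations/cell_types_per_organ.py | get_unique_sources
-- ===== SOURCE A (Python) =====
-- def get_unique_sources(cell_type_set):
--     """A function to isolate unique sources given a set of cel type ID
--
--     Args:
--         cell_type_set (set): A set of cell types
--
--     Returns:
--         dict: s source count dictionary
--     """
--     # create a duct to capture source counts
--     sources = {}
--     for element in cell_type_set:
--         # isolate prefix
--         prefix = element.split(":")[0]
--         if prefix == "":
--             prefix = "NOT_MAPPED"
--         # counts prefix instances
--         if prefix not in sources:
--             sources[prefix] = 1
--         else: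
--             sources[prefix] = sources[prefix]+1
--     return sources
-- ===== SOURCE B (Python) =====
-- def get_unique_sources(cell_type_set):
--     """Count prefix (before ':') occurrences; dedup-then-count instead of an incremental counter."""
--     prefixes = [element.split(":")[0] or "NOT_MAPPED" for element in cell_type_set]
--     return {prefix: prefixes.count(prefix) for prefix in dict.fromkeys(prefixes)}
-- ===== Notes on version B (the rewrite author's own statement) =====
-- stated objective: alternative
-- what changed: Replaces the incremental dict-counter loop by a two-phase map/dedup-then-count comprehension: build the prefix list once, then emit {p: prefixes.count(p)} over the first-occurrence-deduplicated keys.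
import Mathlib
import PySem

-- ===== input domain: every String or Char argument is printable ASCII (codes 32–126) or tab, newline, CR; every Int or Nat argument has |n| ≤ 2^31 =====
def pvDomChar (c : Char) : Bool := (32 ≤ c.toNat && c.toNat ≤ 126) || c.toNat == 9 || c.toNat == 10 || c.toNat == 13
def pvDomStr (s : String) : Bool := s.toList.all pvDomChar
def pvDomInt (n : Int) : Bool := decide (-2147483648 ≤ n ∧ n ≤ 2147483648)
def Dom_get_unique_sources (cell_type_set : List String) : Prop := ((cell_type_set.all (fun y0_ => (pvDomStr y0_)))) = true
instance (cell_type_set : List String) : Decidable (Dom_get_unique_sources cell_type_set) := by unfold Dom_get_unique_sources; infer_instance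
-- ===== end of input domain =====

-- B replaces A's incremental dict-counter loop by dedup-then-count (same result, alternative decomposition, no speed claim).


-- ===== PORT A =====
-- element.split(":")[0]: split? with a nonempty separator always returns some nonempty list,
-- so the [0] index is the head (exact; no IndexError is possible here)
def pvPrefixA (element : String) : String :=
  let pre := ((PySem.Str.split? element ":").getD []).headD ""
  if pre = "" then "NOT_MAPPED" else pre

def get_unique_sources (cell_type_set : List String) : List (String × Int) :=
  (cell_type_set.foldl
      (fun sources element =>
        let pre := pvPrefixA element
        if sources.contains pre = false then
          sources.insert pre 1
        else
          sources.insert pre (sources.getD pre 0 + 1))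
      (PySem.Dict.empty : PySem.Dict String Int)).items

-- ===== PORT B =====
-- element.split(":")[0] or "NOT_MAPPED"  (same head-of-split; '' is the only falsy str)
def pvPrefixB (element : String) : String :=
  let h := ((PySem.Str.split? element ":").getD []).headD ""
  if h = "" then "NOT_MAPPED" else h

def get_unique_sources_alt (cell_type_set : List String) : List (String × Int) :=
  let prefixes := cell_type_set.map pvPrefixB
  (PySem.List.dedup prefixes).map (fun p => (p, (PySem.List.count prefixes p : Int)))

-- ===== PRECONDITION & SPEC =====
def Spec_get_unique_sources (cell_type_set : List String) (out : List (String × Int)) : Prop := out = get_unique_sources_alt cell_type_set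
instance (cell_type_set : List String) (out : List (String × Int)) : Decidable (Spec_get_unique_sources cell_type_set out) := by unfold Spec_get_unique_sources; infer_instance

-- ===== CLAIM (what is proved, stated in full; the proofs are below) =====
def Claim_equal_get_unique_sources : Prop := ∀ (cell_type_set : List String), Dom_get_unique_sources cell_type_set → Spec_get_unique_sources cell_type_set (get_unique_sources cell_type_set)

-- ===== LEMMAS AND PROOFS =====

-- A's two branches are the single update d.insert p (d.getD p 0 + 1):
-- when the key is absent, getD is the default 0
theorem pv_step_collapse (d : PySem.Dict String Int) (p : String) :
    (if d.contains p = false then d.insert p 1 else d.insert p (d.getD p 0 + 1))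
      = d.insert p (d.getD p 0 + 1) := by
  by_cases h : d.contains p = false
  · rw [if_pos h]
    have hget : d.get? p = none := by
      rw [PySem.Dict.contains_eq_isSome_get?] at h
      exact Option.not_isSome_iff_eq_none.mp (by simp_all)
    have : d.getD p 0 = 0 := by
      simp [PySem.Dict.getD_eq_get?_getD, hget]
    rw [this]; norm_num
  · rw [if_neg h]

theorem get_unique_sources_spec : Claim_equal_get_unique_sources := by
  intro xs _
  show get_unique_sources xs = get_unique_sources_alt xs
  unfold get_unique_sources get_unique_sources_alt
  have hpfx : pvPrefixA = pvPrefixB := rfl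
  rw [hpfx]
  -- collapse A's branches and view the loop as a fold over the prefix list
  have hfold :
      xs.foldl
        (fun sources element =>
          let pre := pvPrefixB element
          if sources.contains pre = false then sources.insert pre 1
          else sources.insert pre (sources.getD pre 0 + 1))
        (PySem.Dict.empty : PySem.Dict String Int)
      = (xs.map pvPrefixB).foldl
          (fun d p => d.insert p (d.getD p 0 + 1))
          (PySem.Dict.empty : PySem.Dict String Int) := by
    rw [List.foldl_map]
    exact PySem.List.foldl_congr_mem xs _ _ _ (fun d e _ => pv_step_collapse d (pvPrefixB e))
  rw [hfold]
  set ps := xs.map pvPrefixB with hps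
  have hnd : ((ps.foldl (fun d p => d.insert p (d.getD p 0 + 1))
      (PySem.Dict.empty : PySem.Dict String Int)).keys).Nodup :=
    PySem.Dict.nodup_keys_foldl_insert ps _ _ (by simp [PySem.Dict.keys_empty])
  rw [PySem.Dict.items_eq_map_keys _ hnd 0]
  rw [PySem.Dict.keys_foldl_insert, PySem.Dict.keys_empty, PySem.Set.update_nil_left,
      ← PySem.List.dedup_eq_ofList]
  refine List.map_congr_left (fun p _ => ?_)
  rw [PySem.Dict.getD_foldl_insert_add_one, PySem.Dict.getD_empty, PySem.List.count_eq]
  simp
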